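-- pv_equiv track=rewrite | github.com/DawidCiechowski/CodeAbbeyProblems | CosTam.py | problem19
-- ===== SOURCE A (Python) =====
-- def problem19(list = []):
--     results = []
--
--     for i in range(len(list)):
--         counter = 0
--
--         for j in list:
--             if j == i:
--                 counter += 1
--
--         if(counter > 0):
--             results.append(counter)
--
--
--     return results
-- ===== SOURCE B (Python) =====
-- def problem19(list=[]):
--     n = len(list)
--     counts = {}
--     for x in list:
--         counts[x] = counts.get(x, 0) + 1
--     return [counts[v] for v in sorted(v for v in counts if 0 <= v < n)]
-- ===== Notes on version B (the rewrite author's own statement) =====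
-- stated objective: faster
-- what changed: Replaces the per-index rescan of the whole list (quadratic nested loops) by one counting pass into a dict followed by sorting the in-range keys, emitting each key's count in ascending key order.
import Mathlib
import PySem

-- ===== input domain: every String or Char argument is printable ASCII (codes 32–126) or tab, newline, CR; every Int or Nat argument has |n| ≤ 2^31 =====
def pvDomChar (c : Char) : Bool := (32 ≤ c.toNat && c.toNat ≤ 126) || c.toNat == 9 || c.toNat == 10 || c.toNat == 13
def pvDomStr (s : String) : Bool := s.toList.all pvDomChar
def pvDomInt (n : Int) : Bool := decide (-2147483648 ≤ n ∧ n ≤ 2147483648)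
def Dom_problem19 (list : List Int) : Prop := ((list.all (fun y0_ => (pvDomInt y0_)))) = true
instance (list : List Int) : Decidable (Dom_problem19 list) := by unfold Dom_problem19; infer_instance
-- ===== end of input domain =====

-- B replaces A's per-index rescan of the whole list by one counting pass into a dict plus a sort of the in-range keys (objective: faster).

-- ===== PORT A =====
def problem19 (list : List Int) : List Int :=
  (PySem.List.pyRange 0 (list.length : Int)).foldl
    (fun results i =>
      let counter : Int := list.foldl (fun c j => if j == i then c + 1 else c) 0
      if counter > 0 then results ++ [counter] else results) []

-- ===== PORT B =====
def problem19_alt (list : List Int) : List Int :=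
  let n : Int := (list.length : Int)
  let counts : PySem.Dict Int Int :=
    list.foldl (fun d x => d.insert x (d.getD x 0 + 1)) PySem.Dict.empty
  (PySem.List.sorted (counts.keys.filter (fun v => decide (0 ≤ v) && decide (v < n))) (fun v => v)).map
    (fun v => counts.getD v 0)

-- ===== PRECONDITION & SPEC =====
def Spec_problem19 (list : List Int) (out : List Int) : Prop := out = problem19_alt list
instance (list : List Int) (out : List Int) : Decidable (Spec_problem19 list out) := by unfold Spec_problem19; infer_instance

-- ===== CLAIM (what is proved, stated in full; the proofs are below) =====
def Claim_equal_problem19 : Prop := ∀ (list : List Int), Dom_problem19 list → Spec_problem19 list (problem19 list)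

-- ===== LEMMAS AND PROOFS =====

-- The ascending list of values that occur in `list` and are valid indices of `list`.
def pvKeyList (list : List Int) : List Int :=
  (List.map (fun k : Nat => (k : Int)) (List.range list.length)).filter (fun v => decide (v ∈ list))

theorem pvKeyList_pairwise (list : List Int) :
    List.Pairwise (fun a b : Int => a < b) (pvKeyList list) := by
  refine List.Pairwise.filter _ ?_
  rw [List.pairwise_map]
  exact List.pairwise_lt_range.imp (fun {a b} h => by exact_mod_cast h)

theorem pvKeyList_nodup (list : List Int) : (pvKeyList list).Nodup :=
  (pvKeyList_pairwise list).imp (fun h => ne_of_lt h)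

theorem mem_pvKeyList (list : List Int) (v : Int) :
    v ∈ pvKeyList list ↔ (0 ≤ v ∧ v < (list.length : Int)) ∧ v ∈ list := by
  simp only [pvKeyList, List.mem_filter, List.mem_map, List.mem_range, decide_eq_true_eq]
  constructor
  · rintro ⟨⟨k, hk, rfl⟩, hmem⟩
    exact ⟨⟨Int.natCast_nonneg k, by exact_mod_cast hk⟩, hmem⟩
  · rintro ⟨⟨h0, hn⟩, hmem⟩
    exact ⟨⟨v.toNat, by omega, by omega⟩, hmem⟩

-- A emits, for i = 0,…,len-1 in order, the count of i whenever it is positive.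
theorem problem19_eq (list : List Int) :
    problem19 list = (pvKeyList list).map (fun v => (list.count v : Int)) := by
  unfold problem19
  simp only [PySem.List.foldl_beq_add_one, zero_add, gt_iff_lt]
  rw [PySem.List.foldl_append_ite (fun v : Int => (0:Int) < ((list.count v : Nat) : Int))
        (fun v : Int => ((list.count v : Nat) : Int)),
      PySem.List.pyRange_zero_natCast, List.nil_append, pvKeyList]
  congr 1
  apply List.filter_congr
  intro x _
  simp [List.count_pos_iff]

-- B's dict has the distinct elements of `list` as keys, each mapped to its count.
theorem problem19_alt_eq (list : List Int) :
    problem19_alt list =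
      (PySem.List.sorted
        ((PySem.Set.ofList list).filter
          (fun v => decide (0 ≤ v) && decide (v < (list.length : Int)))) (fun v => v)).map
        (fun v => (list.count v : Int)) := by
  unfold problem19_alt
  have hkeys : (list.foldl (fun d x => d.insert x (d.getD x 0 + 1))
      (PySem.Dict.empty : PySem.Dict Int Int)).keys = PySem.Set.ofList list := by
    rw [PySem.Dict.keys_foldl_insert]
    rfl
  simp only [hkeys, PySem.Dict.getD_foldl_insert_add_one, PySem.Dict.getD_empty, zero_add]

-- Sorting B's in-range keys yields exactly A's ascending index list: both are
-- duplicate-free with the same membership, and pvKeyList is strictly increasing.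
theorem sorted_keys_eq (list : List Int) :
    PySem.List.sorted
      ((PySem.Set.ofList list).filter
        (fun v => decide (0 ≤ v) && decide (v < (list.length : Int)))) (fun v => v)
      = pvKeyList list := by
  apply PySem.List.sorted_eq_of_perm_of_pairwise_lt
  · rw [List.perm_ext_iff_of_nodup (pvKeyList_nodup list)
      ((PySem.Set.nodup_ofList list).filter _)]
    intro v
    simp only [mem_pvKeyList, List.mem_filter, PySem.Set.mem_ofList, Bool.and_eq_true,
      decide_eq_true_eq]
    tauto
  · exact pvKeyList_pairwise list

-- ===== VERDICT (by name: the statement is the Claim_ definition above) =====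
theorem problem19_spec : Claim_equal_problem19 := by
  intro list _
  unfold Spec_problem19
  rw [problem19_eq, problem19_alt_eq, sorted_keys_eq]
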